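-- pv_equiv track=rewrite | github.com/17mirinae/CTF-Python | Python/SEOKCHAN/브루트포스/3.덩치.py | solve
-- ===== SOURCE A (Python) =====
-- def is_bigger(p1, p2):
--     if p1[0] > p2[0] and p1[1] > p2[1]:
--         return True
--     return False
--
-- def solve(people):
--     len_people = len(people)
--     result = [1] * len_people
--     for i in range(len_people):
--         for j in range(len_people):
--             if i == j:
--                 continue
--
--             if is_bigger(people[j], people[i]):
--                 result[i] += 1
--
--     return ' '.join([str(r) for r in result])
-- ===== SOURCE B (Python) =====
-- def solve(people):
--     # Offline dominance sweep: distinct weights in decreasing order; people already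
--     # swept have strictly greater weight, so dominance reduces to a 1D height count.
--     n = len(people)
--     rank = [0] * n
--     heights = []  # heights of everyone with strictly greater weight than the current group
--     for w in sorted({p[0] for p in people}, reverse=True):
--         group = [i for i in range(n) if people[i][0] == w]
--         for i in group:
--             rank[i] = 1 + sum(1 for h2 in heights if h2 > people[i][1])
--         for i in group:
--             heights.append(people[i][1])
--     return ' '.join(str(r) for r in rank)
-- ===== Notes on version B (the rewrite author's own statement) =====
-- stated objective: alternative
-- what changed: B replaces A's all-pairs double loop with an offline dominance sweep: it sorts the distinct weights in decreasing order and processes equal-weight groups while accumulating the heights of strictly heavier people, so the 2D strict-dominance test disappears and each rank is 1 + a 1D count of larger heights among the accumulated list.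
-- outside the precondition, e.g. on solve([(0,)]): A returns '1', B raises IndexError
import Mathlib
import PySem

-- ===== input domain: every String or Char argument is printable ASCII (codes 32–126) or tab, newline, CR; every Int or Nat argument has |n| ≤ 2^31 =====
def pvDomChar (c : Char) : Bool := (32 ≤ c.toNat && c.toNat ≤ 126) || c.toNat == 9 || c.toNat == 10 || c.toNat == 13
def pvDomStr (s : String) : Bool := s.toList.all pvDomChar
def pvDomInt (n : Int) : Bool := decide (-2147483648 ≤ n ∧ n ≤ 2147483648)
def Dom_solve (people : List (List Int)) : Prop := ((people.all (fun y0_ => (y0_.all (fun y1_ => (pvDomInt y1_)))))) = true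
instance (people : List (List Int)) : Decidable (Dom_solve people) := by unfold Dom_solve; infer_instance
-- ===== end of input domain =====

-- B replaces A's all-pairs double loop by an offline sweep over the distinct weights in
-- decreasing order, counting larger heights among the already-swept (strictly heavier) people;
-- same return value on Pre_.

-- ===== PORT A =====
-- p[0], p[1] indexing: exact under Pre_ (every person has ≥ 2 measurements)
def isBigger (p1 p2 : List Int) : Bool :=
  if PySem.List.pyGetD p1 0 0 > PySem.List.pyGetD p2 0 0 ∧ PySem.List.pyGetD p1 1 0 > PySem.List.pyGetD p2 1 0
  then true else false

def solve (people : List (List Int)) : String :=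
  let lenPeople : Int := (people.length : Int)
  let result : List Int := List.replicate people.length 1
  let result := (PySem.List.pyRange 0 lenPeople 1).foldl (fun result i =>
    (PySem.List.pyRange 0 lenPeople 1).foldl (fun result j =>
      if i == j then result
      else if isBigger (PySem.List.pyGetD people j []) (PySem.List.pyGetD people i []) then
        PySem.List.pySetD result i (PySem.List.pyGetD result i 0 + 1)
      else result) result) result
  PySem.Str.join " " (result.map PySem.Int.toStr)

-- ===== PORT B =====
-- the body of Source B's outer 'for w in sorted({...}, reverse=True)' loop
def stepB (people : List (List Int)) (st : List Int × List Int) (w : Int) : List Int × List Int :=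
  let group := (PySem.List.pyRange 0 (people.length : Int) 1).filter
      (fun i => PySem.List.pyGetD (PySem.List.pyGetD people i []) 0 0 == w)
  let rank := group.foldl (fun rank i =>
      PySem.List.pySetD rank i
        (1 + ((st.2.countP (fun h2 => h2 > PySem.List.pyGetD (PySem.List.pyGetD people i []) 1 0) : Nat) : Int))) st.1
  let heights := group.foldl (fun hs i => hs ++ [PySem.List.pyGetD (PySem.List.pyGetD people i []) 1 0]) st.2
  (rank, heights)

def solve_alt (people : List (List Int)) : String :=
  let rank : List Int := List.replicate people.length 0
  let heights : List Int := []
  let st := (PySem.List.sorted (PySem.Set.ofList (people.map (fun p => PySem.List.pyGetD p 0 0)))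
      (fun x => x) true).foldl (stepB people) (rank, heights)
  PySem.Str.join " " (st.1.map PySem.Int.toStr)

-- ===== PRECONDITION & SPEC =====
-- Pre_ excludes people with fewer than two measurements: Python A raises IndexError there
-- whenever the first comparison succeeds (and B itself raises there, in the heights.append pass).
def Pre_solve (people : List (List Int)) : Prop := ∀ p ∈ people, 2 ≤ p.length
instance (people : List (List Int)) : Decidable (Pre_solve people) := by unfold Pre_solve; infer_instance
def pvWitness_solve : List (List Int) := [[60, 180], [50, 170], [60, 180]]

def Spec_solve (people : List (List Int)) (out : String) : Prop := out = solve_alt people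
instance (people : List (List Int)) (out : String) : Decidable (Spec_solve people out) := by unfold Spec_solve; infer_instance

-- ===== CLAIM (what is proved, stated in full; the proofs are below) =====
def Claim_equal_solve : Prop := ∀ (people : List (List Int)), Dom_solve people → Pre_solve people → Spec_solve people (solve people)

-- ===== LEMMAS AND PROOFS =====

-- the common value both programs compute for a person p
def dominates (w h : Int) (q : List Int) : Bool :=
  decide (PySem.List.pyGetD q 0 0 > w) && decide (PySem.List.pyGetD q 1 0 > h)

def rankOf (people : List (List Int)) (p : List Int) : Int :=
  1 + ((people.countP (dominates (PySem.List.pyGetD p 0 0) (PySem.List.pyGetD p 1 0)) : Nat) : Int)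

theorem isBigger_eq_dominates (q p : List Int) :
    isBigger q p = dominates (PySem.List.pyGetD p 0 0) (PySem.List.pyGetD p 1 0) q := by
  simp [isBigger, dominates, Bool.decide_and]

theorem isBigger_self (p : List Int) : isBigger p p = false := by
  simp [isBigger]

-- ===== A side (unchanged characterization: A computes rankOf at every index) =====
theorem inner_count (P : List Int → Bool) :
    ∀ (l : List (List Int)) (t : Nat) (res : List Int), t < res.length →
    (l.foldl (fun res q => if P q then res.set t (res.getD t 0 + 1) else res) res)
      = res.set t (res.getD t 0 + (l.countP P : Int)) := by
  intro l
  induction l with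
  | nil =>
    intro t res ht
    simp only [List.foldl_nil, List.countP_nil, Nat.cast_zero, add_zero]
    rw [List.getD_eq_getElem?_getD, List.getElem?_eq_getElem ht]
    simp
  | cons q l ih =>
    intro t res ht
    simp only [List.foldl_cons, List.countP_cons]
    by_cases hq : P q = true
    · rw [if_pos hq, ih t _ (by simpa using ht)]
      have hget : (res.set t (res.getD t 0 + 1)).getD t 0 = res.getD t 0 + 1 := by
        rw [List.getD_eq_getElem?_getD, List.getD_eq_getElem?_getD,
          List.getElem?_set_self (by simpa using ht)]
        simp [List.getElem?_eq_getElem ht]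
      rw [hget, List.set_set]
      congr 1
      simp [hq]
      ring
    · rw [if_neg hq, ih t res ht]
      congr 2
      simp [hq]

theorem outer_loop (c : Nat → Int) :
    ∀ (I : List Nat) (res : List Int), I.Nodup → (∀ i ∈ I, i < res.length) →
    (I.foldl (fun res i => res.set i (res.getD i 0 + c i)) res).length = res.length ∧
    ∀ k, k < res.length →
      (I.foldl (fun res i => res.set i (res.getD i 0 + c i)) res).getD k 0
        = if k ∈ I then res.getD k 0 + c k else res.getD k 0 := by
  intro I
  induction I with
  | nil => intro res _ _; simp
  | cons i I ih =>
    intro res hnd hlt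
    have hi : i < res.length := hlt i (by simp)
    have hnd' := hnd.of_cons
    have hiI : i ∉ I := by simp at hnd; exact hnd.1
    simp only [List.foldl_cons]
    obtain ⟨hlen, hval⟩ := ih (res.set i (res.getD i 0 + c i)) hnd'
      (by intro j hj; simpa using hlt j (by simp [hj]))
    constructor
    · simpa using hlen
    · intro k hk
      rw [hval k (by simpa using hk)]
      by_cases hkI : k ∈ I
      · have hki : k ≠ i := fun h => hiI (h ▸ hkI)
        simp only [hkI, if_true, List.mem_cons, or_true, if_true]
        rw [List.getD_eq_getElem?_getD, List.getElem?_set_ne (Ne.symm hki),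
          ← List.getD_eq_getElem?_getD]
      · by_cases hki : k = i
        · subst hki
          simp only [hkI, if_false, List.mem_cons, true_or, if_true]
          rw [List.getD_eq_getElem?_getD, List.getElem?_set_self hi]
          simp [List.getElem?_eq_getElem hi]
        · simp only [hkI, if_false, List.mem_cons, hki, or_false, if_false]
          rw [List.getD_eq_getElem?_getD, List.getElem?_set_ne (Ne.symm hki),
            ← List.getD_eq_getElem?_getD]

theorem inner_eq (people : List (List Int)) (ik : Nat) (res : List Int) :
    (PySem.List.pyRange 0 (people.length : Int) 1).foldl (fun result j =>
      if (ik : Int) == j then result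
      else if isBigger (PySem.List.pyGetD people j []) (PySem.List.pyGetD people (ik : Int) []) then
        PySem.List.pySetD result (ik : Int) (PySem.List.pyGetD result (ik : Int) 0 + 1)
      else result) res
    = people.foldl (fun result q =>
        if isBigger q (people.getD ik []) then result.set ik (result.getD ik 0 + 1) else result) res := by
  have hfun : (fun (result : List Int) (j : Int) =>
      if (ik : Int) == j then result
      else if isBigger (PySem.List.pyGetD people j []) (PySem.List.pyGetD people (ik : Int) []) then
        PySem.List.pySetD result (ik : Int) (PySem.List.pyGetD result (ik : Int) 0 + 1)
      else result)
      = (fun (result : List Int) (j : Int) =>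
        if isBigger (PySem.List.pyGetD people j []) (PySem.List.pyGetD people (ik : Int) [])
        then result.set ik (result.getD ik 0 + 1) else result) := by
    funext result j
    by_cases h : (ik : Int) = j
    · subst h
      simp [isBigger_self]
    · simp [h, PySem.List.pySetD_natCast, PySem.List.pyGetD_natCast]
  rw [hfun, PySem.List.foldl_pyRange_zero_pyGetD' people []
    (fun result q => if isBigger q (PySem.List.pyGetD people (ik : Int) [])
      then result.set ik (result.getD ik 0 + 1) else result) res]
  simp [PySem.List.pyGetD_natCast]

theorem outer_chain (people : List (List Int)) :
    ∀ (I : List Nat) (res : List Int), (∀ i ∈ I, i < res.length) →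
    I.foldl (fun (res : List Int) (ik : Nat) =>
      (PySem.List.pyRange 0 (people.length : Int) 1).foldl (fun result j =>
        if (ik : Int) == j then result
        else if isBigger (PySem.List.pyGetD people j []) (PySem.List.pyGetD people (ik : Int) []) then
          PySem.List.pySetD result (ik : Int) (PySem.List.pyGetD result (ik : Int) 0 + 1)
        else result) res) res
    = I.foldl (fun (res : List Int) (ik : Nat) => res.set ik (res.getD ik 0 +
        (people.countP (fun q => isBigger q (people.getD ik [])) : Int))) res := by
  intro I
  induction I with
  | nil => intro res _; rfl
  | cons i I ih =>
    intro res hlt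
    have hi : i < res.length := hlt i (by simp)
    rw [List.foldl_cons, List.foldl_cons, inner_eq,
      inner_count (fun q => isBigger q (people.getD i [])) people i res hi]
    exact ih _ (by intro j hj; simpa using hlt j (by simp [hj]))

theorem solve_eq (people : List (List Int)) :
    solve people = PySem.Str.join " " (people.map (fun p => PySem.Int.toStr (rankOf people p))) := by
  unfold solve
  dsimp only
  congr 1
  nth_rewrite 2 [PySem.List.pyRange_zero_nat people.length]
  rw [List.foldl_map, outer_chain people
    (List.range people.length) (List.replicate people.length 1) (by intro i hi; simpa using hi)]
  suffices h : (List.range people.length).foldl (fun (res : List Int) (ik : Nat) =>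
      res.set ik (res.getD ik 0 + (people.countP (fun q => isBigger q (people.getD ik [])) : Int)))
      (List.replicate people.length 1)
      = people.map (fun p => rankOf people p) by
    rw [h, List.map_map]
    simp [Function.comp]
  obtain ⟨hlen, hval⟩ := outer_loop
    (fun ik => (people.countP (fun q => isBigger q (people.getD ik [])) : Int))
    (List.range people.length) (List.replicate people.length 1)
    (List.nodup_range) (by intro i hi; simpa using hi)
  apply List.ext_getElem
  · rw [hlen]; simp
  · intro k h1 h2
    have hk : k < people.length := by simpa using h2
    have hmem : k ∈ List.range people.length := List.mem_range.mpr hk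
    have hk' : k < (List.replicate people.length (1 : Int)).length := by simpa using hk
    have hgd := hval k hk'
    rw [if_pos hmem] at hgd
    have hEl : (List.foldl (fun res ik => res.set ik (res.getD ik 0 +
        (people.countP (fun q => isBigger q (people.getD ik [])) : Int)))
        (List.replicate people.length 1) (List.range people.length))[k] =
        (List.replicate people.length (1 : Int)).getD k 0 +
        (people.countP (fun q => isBigger q (people.getD k [])) : Int) := by
      rw [← hgd, List.getD_eq_getElem?_getD, List.getElem?_eq_getElem h1]
      rfl
    rw [hEl]
    rw [List.getElem_map]
    have hpd : people.getD k [] = people[k] := by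
      rw [List.getD_eq_getElem?_getD, List.getElem?_eq_getElem hk]; rfl
    rw [hpd]
    unfold rankOf
    rw [List.getD_replicate _ hk]
    have hcnt : (people.countP (fun q => isBigger q people[k]))
        = people.countP (dominates (PySem.List.pyGetD people[k] 0 0) (PySem.List.pyGetD people[k] 1 0)) := by
      apply List.countP_congr
      intro q _
      rw [isBigger_eq_dominates]
    rw [hcnt]

-- ===== B side: the sweep computes rankOf at every index =====

-- the nat-index group of weight w
def grpB (people : List (List Int)) (w : Int) : List Nat :=
  (List.range people.length).filter (fun k => PySem.List.pyGetD (people.getD k []) 0 0 == w)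

theorem stepB_rank (people : List (List Int)) (rank heights : List Int) (w : Int) :
    (stepB people (rank, heights) w).1 =
      (grpB people w).foldl (fun r k => r.set k
        (1 + ((heights.countP (fun h2 => h2 > PySem.List.pyGetD (people.getD k []) 1 0) : Nat) : Int))) rank := by
  unfold stepB grpB
  dsimp only
  rw [PySem.List.pyRange_zero_nat people.length, List.filter_map, List.foldl_map]
  simp only [Function.comp_def, PySem.List.pyGetD_natCast, PySem.List.pySetD_natCast]


theorem stepB_heights (people : List (List Int)) (rank heights : List Int) (w : Int) :
    (stepB people (rank, heights) w).2 =
      heights ++ (grpB people w).map (fun k => PySem.List.pyGetD (people.getD k []) 1 0) := by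
  unfold stepB grpB
  dsimp only
  rw [PySem.List.pyRange_zero_nat people.length, List.filter_map, List.foldl_map]
  simp only [Function.comp_def, PySem.List.pyGetD_natCast]
  rw [PySem.List.foldl_append_singleton_eq_map]


theorem set_fold (v : Nat → Int) :
    ∀ (I : List Nat) (res : List Int), (∀ i ∈ I, i < res.length) →
    ((I.foldl (fun r i => r.set i (v i)) res).length = res.length ∧
     ∀ k, (I.foldl (fun r i => r.set i (v i)) res).getD k 0
        = if k ∈ I then v k else res.getD k 0) := by
  intro I
  induction I with
  | nil => simp
  | cons i I ih =>
    intro res hlt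
    have hi : i < res.length := hlt i (by simp)
    simp only [List.foldl_cons]
    obtain ⟨hlen, hval⟩ := ih (res.set i (v i)) (by intro j hj; simpa using hlt j (by simp [hj]))
    refine ⟨by simpa using hlen, ?_⟩
    intro k
    rw [hval k]
    by_cases hkI : k ∈ I
    · simp [hkI]
    · by_cases hki : k = i
      · subst hki
        simp only [hkI, if_false, List.mem_cons, true_or, if_true]
        rw [List.getD_eq_getElem?_getD, List.getElem?_set_self hi]
        simp
      · simp only [hkI, if_false, List.mem_cons, hki, or_false, if_false]
        rw [List.getD_eq_getElem?_getD, List.getElem?_set_ne (Ne.symm hki),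
          ← List.getD_eq_getElem?_getD]


theorem countP_split {α : Type} (p q r : α → Bool) :
    ∀ (l : List α), (∀ x ∈ l, p x = (q x || r x) ∧ ¬(q x = true ∧ r x = true)) →
    l.countP p = l.countP q + l.countP r := by
  intro l
  induction l with
  | nil => simp
  | cons x l ih =>
    intro hx
    obtain ⟨hpx, hdisj⟩ := hx x (by simp)
    rw [List.countP_cons, List.countP_cons, List.countP_cons,
      ih (fun y hy => hx y (by simp [hy]))]
    rcases hq : q x <;> rcases hr : r x <;> simp [hpx, hq, hr] at hdisj ⊢ <;> omega


theorem countP_grp (people : List (List Int)) (w h : Int) :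
    ((grpB people w).map (fun k => PySem.List.pyGetD (people.getD k []) 1 0)).countP
        (fun h2 => h2 > h)
      = people.countP (fun q => (PySem.List.pyGetD q 0 0 == w)
          && decide (PySem.List.pyGetD q 1 0 > h)) := by
  unfold grpB
  rw [List.countP_map, List.countP_filter]
  have hmap : (List.range people.length).map (fun k => people.getD k []) = people := by
    have := PySem.List.map_pyGetD_pyRange_zero' people []
    rw [PySem.List.pyRange_zero_nat people.length, List.map_map] at this
    simpa only [Function.comp_def, List.map_map, PySem.List.pyGetD_natCast] using this
  conv_rhs => rw [← hmap]
  rw [List.countP_map]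
  apply List.countP_congr
  intro k _
  simp [Function.comp, Bool.and_comm]


theorem sweepB (people : List (List Int)) :
    ∀ (ws rank heights : List Int),
    ws.Pairwise (· > ·) →
    (∀ q ∈ people, PySem.List.pyGetD q 0 0 ∈ ws ∨ ∀ w' ∈ ws, w' < PySem.List.pyGetD q 0 0) →
    rank.length = people.length →
    (∀ h : Int, heights.countP (fun h2 => h2 > h) =
        people.countP (fun q => (ws.all (fun w' => decide (w' < PySem.List.pyGetD q 0 0)))
          && decide (PySem.List.pyGetD q 1 0 > h))) →
    (∀ k, k < people.length → PySem.List.pyGetD (people.getD k []) 0 0 ∉ ws →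
        rank.getD k 0 = rankOf people (people.getD k [])) →
    (ws.foldl (stepB people) (rank, heights)).1.length = people.length ∧
    ∀ k, k < people.length →
      (ws.foldl (stepB people) (rank, heights)).1.getD k 0 = rankOf people (people.getD k []) := by
  intro ws
  induction ws with
  | nil =>
    intro rank heights _ _ hlen _ hR
    refine ⟨hlen, ?_⟩
    intro k hk
    exact hR k hk (by simp)
  | cons w ws ih =>
    intro rank heights hpw hcov hlen hH hR
    have hw' : ∀ w' ∈ ws, w' < w := (List.pairwise_cons.mp hpw).1
    -- group members are in range
    have hG : ∀ i ∈ grpB people w, i < rank.length := by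
      intro i hi
      rw [hlen]
      exact List.mem_range.mp (List.mem_of_mem_filter hi)
    -- the value written for each group member is its rank
    have hval : ∀ k, k < people.length →
        PySem.List.pyGetD (people.getD k []) 0 0 = w →
        (1 + ((heights.countP (fun h2 => h2 > PySem.List.pyGetD (people.getD k []) 1 0) : Nat) : Int))
          = rankOf people (people.getD k []) := by
      intro k hk hkw
      rw [hH]
      unfold rankOf
      congr 2
      apply List.countP_congr
      intro q _
      unfold dominates
      rw [hkw]
      rw [List.all_cons]
      rcases hlt : decide (w < PySem.List.pyGetD q 0 0) with _ | _
      · simp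
      · have hws : ws.all (fun w' => decide (w' < PySem.List.pyGetD q 0 0)) = true := by
          simp only [List.all_eq_true, decide_eq_true_eq]
          intro w' hw''
          simp at hlt
          exact lt_trans (hw' w' hw'') hlt
        rw [hws]
        simp
    rw [List.foldl_cons]
    have hstep1 := stepB_rank people rank heights w
    have hstep2 := stepB_heights people rank heights w
    have hpair : stepB people (rank, heights) w =
        ((stepB people (rank, heights) w).1, (stepB people (rank, heights) w).2) := rfl
    rw [hpair, hstep1, hstep2]
    obtain ⟨hslen, hsval⟩ := set_fold
      (fun k => 1 + ((heights.countP (fun h2 => h2 > PySem.List.pyGetD (people.getD k []) 1 0) : Nat) : Int))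
      (grpB people w) rank hG
    apply ih
    · exact hpw.of_cons
    · intro q hq
      rcases hcov q hq with hmem | hall
      · rcases List.mem_cons.mp hmem with hqw | hmem'
        · right
          intro w' hw''
          rw [hqw]
          exact hw' w' hw''
        · left; exact hmem'
      · right
        intro w' hw''
        exact hall w' (by simp [hw''])
    · rw [hslen, hlen]
    · -- heights invariant for ws
      intro h
      rw [List.countP_append, hH h, countP_grp people w h]
      symm
      apply countP_split
      intro q hq
      rcases hcov q hq with hmem | hall
      · rcases List.mem_cons.mp hmem with hqw | hmem'
        · -- weight equals w
          have hA : ws.all (fun w' => decide (w' < PySem.List.pyGetD q 0 0)) = true := by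
            simp [List.all_eq_true, hqw]
            intro w' hw''; exact hw' w' hw''
          have hB : decide (w < PySem.List.pyGetD q 0 0) = false := by simp [hqw]
          have hD : (PySem.List.pyGetD q 0 0 == w) = true := by simp [hqw]
          simp [hA, hB, hD, List.all_cons]
        · -- weight in ws
          have hA : ws.all (fun w' => decide (w' < PySem.List.pyGetD q 0 0)) = false := by
            simp
            exact ⟨_, hmem', le_refl _⟩
          have hD : (PySem.List.pyGetD q 0 0 == w) = false := by
            simp
            have := hw' _ hmem'
            omega
          simp [hA, hD, List.all_cons]
      · -- weight greater than everything
        have hA : ws.all (fun w' => decide (w' < PySem.List.pyGetD q 0 0)) = true := by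
          simp [List.all_eq_true]
          intro w' hw''; exact hall w' (by simp [hw''])
        have hB : decide (w < PySem.List.pyGetD q 0 0) = true := by
          simp; exact hall w (by simp)
        have hD : (PySem.List.pyGetD q 0 0 == w) = false := by
          simp
          have := hall w (by simp)
          omega
        simp [hA, hB, hD, List.all_cons]
    · -- rank invariant for ws
      intro k hk hknot
      rw [hsval k]
      by_cases hkw : PySem.List.pyGetD (people.getD k []) 0 0 = w
      · have hkG : k ∈ grpB people w := by
          unfold grpB
          rw [List.mem_filter]
          refine ⟨List.mem_range.mpr hk, ?_⟩
          simp only [beq_iff_eq]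
          exact hkw
        rw [if_pos hkG]
        exact hval k hk hkw
      · have hkG : k ∉ grpB people w := by
          unfold grpB
          rw [List.mem_filter]
          rintro ⟨_, hc⟩
          simp only [beq_iff_eq] at hc
          exact hkw hc
        rw [if_neg hkG]
        exact hR k hk (by simp only [List.mem_cons, not_or]; exact ⟨hkw, hknot⟩)


theorem solveAlt_eq (people : List (List Int)) :
    solve_alt people = PySem.Str.join " " (people.map (fun p => PySem.Int.toStr (rankOf people p))) := by
  unfold solve_alt
  dsimp only
  congr 1
  have hpw : (PySem.List.sorted (PySem.Set.ofList (people.map (fun p => PySem.List.pyGetD p 0 0)))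
      (fun x => x) true).Pairwise (· > ·) := by
    have hle := PySem.List.sorted_pairwise_rev
      (PySem.Set.ofList (people.map (fun p => PySem.List.pyGetD p 0 0))) (fun x => x)
    have hnd : (PySem.List.sorted (PySem.Set.ofList (people.map (fun p => PySem.List.pyGetD p 0 0)))
        (fun x => x) true).Nodup :=
      ((PySem.List.sorted_perm _ _ true).nodup_iff).mpr (PySem.Set.nodup_ofList _)
    exact (hle.and hnd).imp (fun h => lt_of_le_of_ne h.1 (fun he => h.2 he.symm))
  have hmemW : ∀ q ∈ people, PySem.List.pyGetD q 0 0 ∈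
      PySem.List.sorted (PySem.Set.ofList (people.map (fun p => PySem.List.pyGetD p 0 0)))
        (fun x => x) true := by
    intro q hq
    rw [PySem.List.mem_sorted, PySem.Set.mem_ofList]
    exact List.mem_map_of_mem hq
  obtain ⟨hlen, hval⟩ := sweepB people
    (PySem.List.sorted (PySem.Set.ofList (people.map (fun p => PySem.List.pyGetD p 0 0))) (fun x => x) true)
    (List.replicate people.length 0) [] hpw
    (by intro q hq; exact Or.inl (hmemW q hq))
    (by simp)
    (by
      intro h
      rw [List.countP_nil]
      symm
      apply List.countP_eq_zero.mpr
      intro q hq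
      simp only [Bool.and_eq_true, List.all_eq_true, decide_eq_true_eq]
      rintro ⟨hall, -⟩
      exact absurd (hall _ (hmemW q hq)) (lt_irrefl _))
    (by
      intro k hk hnot
      exact absurd (hmemW (people.getD k []) (by
        rw [List.getD_eq_getElem?_getD, List.getElem?_eq_getElem hk]
        exact List.mem_of_getElem rfl)) hnot)
  suffices hres : ((PySem.List.sorted (PySem.Set.ofList (people.map (fun p => PySem.List.pyGetD p 0 0)))
      (fun x => x) true).foldl (stepB people) (List.replicate people.length 0, [])).1
      = people.map (fun p => rankOf people p) by
    rw [hres, List.map_map]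
    rfl
  apply List.ext_getElem
  · rw [hlen]; simp
  · intro k h1 h2
    have hk : k < people.length := by simpa using h2
    have hgd := hval k hk
    rw [List.getD_eq_getElem?_getD, List.getElem?_eq_getElem h1] at hgd
    simp only [Option.getD_some] at hgd
    rw [List.getElem_map, hgd]
    congr 1
    rw [List.getD_eq_getElem?_getD, List.getElem?_eq_getElem hk]
    rfl


-- ===== VERDICT (by name: the statement is the Claim_ definition above) =====
theorem solve_spec : Claim_equal_solve := by
  intro people _ _
  unfold Spec_solve
  rw [solve_eq, solveAlt_eq]
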